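-- pv_equiv track=rewrite | github.com/fferegrino/zeldaKG | rag/zelda_kg.py | format_results_as_markdown_table
-- ===== SOURCE A (Python) =====
-- def format_results_as_markdown_table(results):
--     if not results:
--         return ""
--
--     headers = results[0]
--
--     columns = len(headers)
--
--     column_widths = [len(header) for header in headers]
--
--     for result in results[1:]:
--         column_widths = [
--             max(column_width, len(value)) for column_width, value in zip(column_widths, result)
--         ]
--
--     rows = []
--     def format_row(row, space_char=" "):
--         return "|" + ("|".join([f"{space_char}{value:<{column_widths[i]}}{space_char}" for i, value in enumerate(row)])) + "|"
--
--     rows.append(format_row(headers))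
--     rows.append(format_row(["-" * column_widths[i] for i in range(columns)], "-"))
--     for result in results[1:]:
--         rows.append(format_row(result))
--     rows.append("")
--     return "\n".join(rows)
-- ===== SOURCE B (Python) =====
-- def format_results_as_markdown_table(results):
--     if not results:
--         return ""
--     body = results[1:]
--     # Build the table column by column: each column is a fully padded list of
--     # cells (header cell, separator cell, data cells), then transpose by index.
--     cols = []
--     for i, h in enumerate(results[0]):
--         cells = [h] + [r[i] for r in body]
--         w = max(len(c) for c in cells)
--         cols.append([" " + h.ljust(w) + " ", "-" * (w + 2)]
--                     + [" " + c.ljust(w) + " " for c in cells[1:]])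
--     return "".join("|" + "|".join(col[j] for col in cols) + "|\n"
--                    for j in range(len(body) + 2))
-- ===== Notes on version B (the rewrite author's own statement) =====
-- stated objective: alternative
-- what changed: B constructs the table column by column — for each header column it builds the complete padded cell list (header cell, its own separator cell, data cells) — and then transposes by index to emit the lines, whereas A works row by row with a running width accumulator folded over the rows and a shared format_row helper.
import Mathlib
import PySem

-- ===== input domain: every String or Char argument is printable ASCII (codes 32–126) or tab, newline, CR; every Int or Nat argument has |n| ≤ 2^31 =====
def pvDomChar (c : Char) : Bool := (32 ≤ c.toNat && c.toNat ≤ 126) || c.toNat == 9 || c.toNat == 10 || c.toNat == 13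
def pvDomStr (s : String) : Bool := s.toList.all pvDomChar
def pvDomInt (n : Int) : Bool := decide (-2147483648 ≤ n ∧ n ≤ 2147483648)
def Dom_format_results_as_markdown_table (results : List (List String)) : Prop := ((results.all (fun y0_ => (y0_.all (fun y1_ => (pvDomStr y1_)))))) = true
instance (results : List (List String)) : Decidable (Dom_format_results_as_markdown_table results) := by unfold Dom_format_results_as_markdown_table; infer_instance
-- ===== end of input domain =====

-- B builds the table column by column (each column a fully padded cell list with its own
-- separator cell) and then transposes by index, instead of A's row-wise construction with
-- a running width accumulator and a format_row helper (objective: alternative).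

-- ===== PORT A =====
-- f"{value:<{w}}" : left-justify with spaces (never truncates; w - len clamps at 0 like Python's no-pad case)
def pvA_pad (v : List Char) (w : Nat) : List Char := v ++ List.replicate (w - v.length) ' '

-- format_row(row, space_char): column_widths[i] is in range on every input Pre_ admits (out of range Python raises IndexError, excluded by Pre_; getD is a total stand-in there)
def pvA_formatRow (widths : List Nat) (row : List (List Char)) (c : List Char) : List Char :=
  ['|'] ++ PySem.Chars.join ['|']
    ((PySem.List.enumerate row).map (fun iv => c ++ pvA_pad iv.2 (widths.getD iv.1.toNat 0) ++ c)) ++ ['|']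

def format_results_as_markdown_table (results : List (List String)) : String :=
  match results with
  | [] => ""
  | headers :: rest =>
    let hs := headers.map String.toList
    let rs := rest.map (List.map String.toList)
    let columns := hs.length
    let widths := rs.foldl
      (fun ws r => List.zipWith (fun w v => max w v.length) ws r) (hs.map List.length)
    let rows := [pvA_formatRow widths hs [' '],
                 pvA_formatRow widths
                   ((List.range columns).map (fun i => List.replicate (widths.getD i 0) '-')) ['-']]
                ++ rs.map (fun r => pvA_formatRow widths r [' ']) ++ [[]]
    String.ofList (PySem.Chars.join ['\n'] rows)

-- ===== PORT B =====
-- " " + c.ljust(w) + " "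
def pvB_pad (v : List Char) (w : Nat) : List Char :=
  [' '] ++ v ++ List.replicate (w - v.length) ' ' ++ [' ']

-- max(len(c) for c in cells)  over  cells = [h] + [r[i] for r in body]
def pvB_w (rs : List (List (List Char))) (i : Nat) (h : List Char) : Nat :=
  ((h :: rs.map (fun r => r.getD i [])).map List.length).foldl max 0

-- one fully padded column: header cell, separator cell, data cells
-- (r.getD i [] stands for r[i]; out of range Python raises IndexError — those rows lie outside Pre_)
def pvB_col (rs : List (List (List Char))) (i : Nat) (h : List Char) : List (List Char) :=
  pvB_pad h (pvB_w rs i h) :: List.replicate (pvB_w rs i h + 2) '-'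
    :: rs.map (fun r => pvB_pad (r.getD i []) (pvB_w rs i h))

def format_results_as_markdown_table_alt (results : List (List String)) : String :=
  match results with
  | [] => ""
  | headers :: rest =>
    let hs := headers.map String.toList
    let rs := rest.map (List.map String.toList)
    let cols := (PySem.List.enumerate hs).map (fun ih => pvB_col rs ih.1.toNat ih.2)
    String.ofList (List.flatten ((List.range (rs.length + 2)).map
      (fun j => ['|'] ++ PySem.Chars.join ['|'] (cols.map (fun col => col.getD j [])) ++ ['|', '\n'])))

-- ===== PRECONDITION & SPEC =====
-- Pre_ excludes ragged tables: whenever some data row's length differs from the header's,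
-- A raises IndexError in format_row (shorter rows shrink column_widths via zip; longer rows index past it).
def Pre_format_results_as_markdown_table (results : List (List String)) : Prop :=
  ∀ r ∈ results.tail, r.length = (results.headD []).length
instance (results : List (List String)) : Decidable (Pre_format_results_as_markdown_table results) := by
  unfold Pre_format_results_as_markdown_table; infer_instance

def pvWitness_format_results_as_markdown_table : List (List String) := [["a", "bb"], ["cc", "d"]]

def Spec_format_results_as_markdown_table (results : List (List String)) (out : String) : Prop := out = format_results_as_markdown_table_alt results
instance (results : List (List String)) (out : String) : Decidable (Spec_format_results_as_markdown_table results out) := by unfold Spec_format_results_as_markdown_table; infer_instance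

-- ===== CLAIM (what is proved, stated in full; the proofs are below) =====
def Claim_equal_format_results_as_markdown_table : Prop := ∀ (results : List (List String)), Dom_format_results_as_markdown_table results → Pre_format_results_as_markdown_table results → Spec_format_results_as_markdown_table results (format_results_as_markdown_table results)

-- ===== LEMMAS AND PROOFS =====

-- A's accumulator fold over equal-length rows computes, at each index, a running max.
theorem pv_foldl_zip_widths (rs : List (List (List Char))) :
    ∀ (init : List Nat), (∀ r ∈ rs, r.length = init.length) →
    rs.foldl (fun ws r => List.zipWith (fun w v => max w v.length) ws r) init
      = (List.range init.length).map
          (fun i => (rs.map (fun r => (r.getD i []).length)).foldl max (init.getD i 0)) := by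
  induction rs with
  | nil =>
    intro init _
    simp only [List.foldl_nil, List.map_nil]
    apply List.ext_getElem
    · simp
    · intro k h1 h2
      simp [List.getD_eq_getElem?_getD, h1]
  | cons r rs ih =>
    intro init hlen
    have hr : r.length = init.length := hlen r (by simp)
    have hzlen : (List.zipWith (fun w v => max w v.length) init r).length = init.length := by
      simp [hr]
    rw [List.foldl_cons, ih _ (by
      intro r' hr'
      rw [hzlen]; exact hlen r' (by simp [hr']))]
    rw [hzlen]
    apply List.map_congr_left
    intro i hi
    have hi' : i < init.length := List.mem_range.mp hi
    have hir : i < r.length := by omega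
    simp only [List.map_cons, List.foldl_cons]
    congr 1
    rw [List.getD_eq_getElem _ _ (by omega), List.getD_eq_getElem _ _ hi',
      List.getD_eq_getElem _ _ hir, List.getElem_zipWith]

-- A's dash row through format_row("-"*w, "-") as a direct per-column separator list.
theorem pv_sep_eq (widths : List Nat) (n : Nat) (hn : widths.length = n) :
    pvA_formatRow widths ((List.range n).map (fun i => List.replicate (widths.getD i 0) '-')) ['-']
      = ['|'] ++ PySem.Chars.join ['|'] (widths.map (fun w => List.replicate (w + 2) '-')) ++ ['|'] := by
  unfold pvA_formatRow
  congr 1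
  congr 1
  congr 1
  apply List.ext_getElem
  · simp [hn]
  · intro k h1 h2
    have hk : k < n := by simpa [hn] using h2
    have hkw : k < widths.length := by omega
    simp only [List.getElem_map, PySem.List.getElem_enumerate, List.getElem_range]
    rw [List.getD_eq_getElem _ _ hkw]
    have hg : widths.getD ((0 + (k : Int)).toNat) 0 = widths[k] := by
      simp [List.getD_eq_getElem?_getD, hkw]
    simp only [pvA_pad, hg, List.length_replicate, Nat.sub_self, List.replicate_zero,
      List.append_nil]
    have : widths[k] + 2 = 1 + (widths[k] + 1) := by omega
    rw [this, List.replicate_add, List.replicate_add]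
    simp

-- join with separator c and a trailing empty piece = flatten of the pieces each followed by c.
theorem pv_join_trailing (c : Char) (ls : List (List Char)) :
    PySem.Chars.join [c] (ls ++ [[]]) = (ls.map (fun l => l ++ [c])).flatten := by
  induction ls with
  | nil => simp [PySem.Chars.join_singleton]
  | cons a t ih =>
    cases t with
    | nil => simp [PySem.Chars.join_cons_cons, PySem.Chars.join_singleton]
    | cons b t' =>
      simp only [List.cons_append, PySem.Chars.join_cons_cons] at ih ⊢
      simp [ih]

-- range (n+2) unrolled twice
theorem pv_range_add_two_map {β : Type} (n : Nat) (f : Nat → β) :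
    (List.range (n+2)).map f = f 0 :: f 1 :: (List.range n).map (fun k => f (k+2)) := by
  rw [List.range_succ_eq_map, List.range_succ_eq_map]
  simp [List.map_map, Function.comp]

-- A's space cell is B's padded cell.
theorem pv_cell_eq (v : List Char) (w : Nat) :
    [' '] ++ pvA_pad v w ++ [' '] = pvB_pad v w := by
  simp [pvA_pad, pvB_pad]

-- ===== VERDICT (by name: the statement is the Claim_ definition above) =====
theorem format_results_as_markdown_table_spec : Claim_equal_format_results_as_markdown_table := by
  intro results _ pre
  unfold Spec_format_results_as_markdown_table
  match results with
  | [] => rfl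
  | headers :: rest =>
    unfold format_results_as_markdown_table format_results_as_markdown_table_alt
    simp only
    set hs := headers.map String.toList with hhs
    set rs := rest.map (List.map String.toList) with hrs
    have hlen : ∀ r ∈ rs, r.length = (hs.map List.length).length := by
      intro r hr
      simp only [hrs, List.mem_map] at hr
      obtain ⟨r0, hr0, rfl⟩ := hr
      have := pre r0 (by simpa using hr0)
      simpa [hhs] using this
    rw [pv_foldl_zip_widths rs (hs.map List.length) hlen]
    set W := (List.range (hs.map List.length).length).map
      (fun i => (rs.map (fun r => (r.getD i []).length)).foldl max
        ((hs.map List.length).getD i 0)) with hWdef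
    have hWlen : W.length = hs.length := by simp [hWdef]
    -- the two width notions agree
    have hwF : ∀ k, k < hs.length →
        (rs.map (fun r => (r.getD k []).length)).foldl max ((hs.map List.length).getD k 0)
          = pvB_w rs k (hs.getD k []) := by
      intro k hk
      unfold pvB_w
      simp only [List.map_cons, List.foldl_cons, List.map_map]
      rw [List.getD_eq_getElem _ _ (by simpa using hk), List.getD_eq_getElem _ _ hk,
        List.getElem_map]
      simp [Function.comp_def]
    have hw : ∀ k, k < hs.length → W.getD k 0 = pvB_w rs k (hs.getD k []) := by
      intro k hk
      have hsome : W[k]? = some (pvB_w rs k (hs.getD k [])) := by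
        rw [hWdef, List.getElem?_map, List.getElem?_range (by simpa using hk)]
        simp only [Option.map_some]
        rw [hwF k hk]
      simp [List.getD_eq_getElem?_getD, hsome]
    -- the per-column cell lists of B, per row index
    set cols := (PySem.List.enumerate hs).map (fun ih => pvB_col rs ih.1.toNat ih.2) with hcols
    -- header line
    have h0 : pvA_formatRow W hs [' ']
        = ['|'] ++ PySem.Chars.join ['|'] (cols.map (fun col => col.getD 0 [])) ++ ['|'] := by
      unfold pvA_formatRow
      congr 2
      congr 1
      rw [hcols, List.map_map]
      apply List.map_congr_left
      intro p hp
      obtain ⟨k, hk, rfl⟩ := (PySem.List.mem_enumerate_iff _ _ _).mp hp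
      simp only [Function.comp, pvB_col, List.getD_cons_zero]
      rw [pv_cell_eq]
      congr 1
      have h0k : ((0 : Int) + (k : Int)).toNat = k := by simp
      rw [h0k, hw k hk, List.getD_eq_getElem _ _ hk]
    -- separator line
    have h1 : pvA_formatRow W ((List.range hs.length).map
          (fun i => List.replicate (W.getD i 0) '-')) ['-']
        = ['|'] ++ PySem.Chars.join ['|'] (cols.map (fun col => col.getD 1 [])) ++ ['|'] := by
      rw [pv_sep_eq W hs.length hWlen]
      congr 2
      congr 1
      rw [hcols, List.map_map]
      apply List.ext_getElem
      · simp
      · intro k hk1 hk2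
        have hk : k < hs.length := by simpa using hk2
        simp only [List.getElem_map, List.getElem_range, PySem.List.getElem_enumerate,
          Function.comp_apply, pvB_col, List.getD_cons_succ, List.getD_cons_zero]
        have h0k : ((0 : Int) + (k : Int)).toNat = k := by simp
        rw [h0k, hwF k hk, List.getD_eq_getElem _ _ hk]
    -- data lines
    have h2 : ∀ k, (hk : k < rs.length) →
        pvA_formatRow W (rs[k]) [' ']
        = ['|'] ++ PySem.Chars.join ['|'] (cols.map (fun col => col.getD (k+2) [])) ++ ['|'] := by
      intro k hk
      have hrk : rs[k].length = hs.length := by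
        have := hlen rs[k] (List.getElem_mem hk)
        simpa using this
      unfold pvA_formatRow
      congr 2
      congr 1
      rw [hcols, List.map_map]
      apply List.ext_getElem
      · simp [hrk]
      · intro m hm1 hm2
        have hm : m < hs.length := by simpa using hm2
        have hmr : m < rs[k].length := by omega
        simp only [List.getElem_map, PySem.List.getElem_enumerate, Function.comp_apply,
          pvB_col, List.getD_cons_succ]
        have h0m : ((0 : Int) + (m : Int)).toNat = m := by simp
        rw [h0m]
        have hget : (rs.map (fun r => pvB_pad (r.getD m [])
            (pvB_w rs m (hs[m])))).getD k [] = pvB_pad (rs[k].getD m []) (pvB_w rs m (hs[m])) := by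
          rw [List.getD_eq_getElem _ _ (by simpa using hk), List.getElem_map]
        rw [hget, pv_cell_eq, List.getD_eq_getElem _ _ hmr]
        congr 1
        rw [hw m hm, List.getD_eq_getElem _ _ hm]
    -- assemble: trailing-newline join on the A side, unrolled range on the B side
    congr 1
    rw [pv_join_trailing, pv_range_add_two_map rs.length]
    congr 1
    simp only [List.map_append, List.map_cons, List.map_nil]
    rw [h0, h1]
    have hcons : ∀ (X : List (List Char)),
        (['|'] ++ PySem.Chars.join ['|'] X ++ ['|']) ++ ['\n']
        = ['|'] ++ PySem.Chars.join ['|'] X ++ ['|', '\n'] := by intro X; simp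
    rw [List.cons_append, List.cons_append, List.nil_append]
    congr 1
    · exact hcons _
    rw [List.singleton_append]
    congr 1
    · exact hcons _
    rw [List.map_map]
    apply List.ext_getElem
    · simp
    · intro k hk1 hk2
      have hk : k < rs.length := by simpa using hk1
      simp only [List.getElem_map, List.getElem_range, Function.comp_apply]
      rw [h2 k hk]
      exact hcons _
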